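-- pv_equiv track=rewrite | github.com/ethanwfang/structured-contained-sindy | src/sc_sindy/utils/equations.py | _term_to_latex
-- ===== SOURCE A (Python) =====
-- def _term_to_latex(name: str) -> str:
--     """Convert polynomial term name to LaTeX."""
--     if len(name) <= 1:
--         return name
--
--     # Count occurrences of each variable
--     counts = {}
--     for char in name:
--         counts[char] = counts.get(char, 0) + 1
--
--     # Build LaTeX representation
--     parts = []
--     for var in sorted(counts.keys()):
--         count = counts[var]
--         if count == 1:
--             parts.append(var)
--         else:
--             parts.append(f"{var}^{{{count}}}")
--
--     return "".join(parts)
-- ===== SOURCE B (Python) =====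
-- def _term_to_latex(name: str) -> str:
--     """Convert polynomial term name to LaTeX."""
--     if len(name) <= 1:
--         return name
--
--     # Walk maximal runs of the sorted characters; no counting table is built.
--     s = sorted(name)
--     out = []
--     i = 0
--     while i < len(s):
--         j = i
--         while j < len(s) and s[j] == s[i]:
--             j += 1
--         n = j - i
--         out.append(s[i] if n == 1 else f"{s[i]}^{{{n}}}")
--         i = j
--     return "".join(out)
-- ===== Notes on version B (the rewrite author's own statement) =====
-- stated objective: alternative
-- what changed: Replaces the frequency dict plus sorted-keys pass with a single walk over the sorted character list, emitting one part per maximal run of equal characters (run length = exponent); no counting table is maintained.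
import Mathlib
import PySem

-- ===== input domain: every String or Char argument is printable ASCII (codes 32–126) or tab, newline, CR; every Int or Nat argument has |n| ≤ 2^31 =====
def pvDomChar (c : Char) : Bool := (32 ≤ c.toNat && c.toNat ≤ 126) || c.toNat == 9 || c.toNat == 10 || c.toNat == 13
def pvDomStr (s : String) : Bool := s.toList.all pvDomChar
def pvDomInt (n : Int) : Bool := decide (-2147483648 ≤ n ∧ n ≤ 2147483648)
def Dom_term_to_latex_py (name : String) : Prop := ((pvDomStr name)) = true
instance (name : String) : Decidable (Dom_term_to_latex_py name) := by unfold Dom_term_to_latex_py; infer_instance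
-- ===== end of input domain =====

-- B replaces A's frequency dict + sorted-keys pass with a single walk over the
-- maximal runs of the sorted character list (alternative decomposition, same cost).

-- ===== PORT A =====
-- counts[var] always succeeds (var is a key), so the lookup is ported as getD.
def term_to_latex_py (name : String) : String :=
  if PySem.Str.len name ≤ 1 then name
  else
    PySem.Str.join ""
      (((PySem.List.sorted
          ((name.toList.foldl (fun d ch => d.modify ch 0 (· + 1)) PySem.Dict.empty : PySem.Dict Char Int)).keys
          (fun x => x)).foldl
        (fun parts v =>
          if ((name.toList.foldl (fun d ch => d.modify ch 0 (· + 1)) PySem.Dict.empty : PySem.Dict Char Int)).getD v 0 == 1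
          then parts ++ [String.ofList [v]]
          else parts ++ [String.ofList [v] ++ "^{" ++
            PySem.Int.toStr (((name.toList.foldl (fun d ch => d.modify ch 0 (· + 1)) PySem.Dict.empty : PySem.Dict Char Int)).getD v 0) ++ "}"]) []))

-- ===== PORT B =====
-- the inner `while s[j] == s[i]` scan of one run = takeWhile/dropWhile on the rest
def runsParts : List Char → List String
  | [] => []
  | c :: rest =>
    (if (rest.takeWhile (· == c)).length + 1 = 1 then String.ofList [c]
     else String.ofList [c] ++ "^{" ++ PySem.Int.toStr (((rest.takeWhile (· == c)).length + 1 : Nat) : Int) ++ "}")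
      :: runsParts (rest.dropWhile (· == c))
termination_by s => s.length
decreasing_by
  simpa using Nat.lt_succ_of_le (List.length_dropWhile_le (· == c) rest)

def term_to_latex_py_alt (name : String) : String :=
  if PySem.Str.len name ≤ 1 then name
  else PySem.Str.join "" (runsParts (PySem.List.sorted name.toList (fun x => x)))

-- ===== PRECONDITION & SPEC =====
def Spec_term_to_latex_py (name : String) (out : String) : Prop := out = term_to_latex_py_alt name
instance (name : String) (out : String) : Decidable (Spec_term_to_latex_py name out) := by unfold Spec_term_to_latex_py; infer_instance

-- ===== CLAIM (what is proved, stated in full; the proofs are below) =====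
def Claim_equal_term_to_latex_py : Prop := ∀ (name : String), Dom_term_to_latex_py name → Spec_term_to_latex_py name (term_to_latex_py name)

-- ===== LEMMAS AND PROOFS =====

-- heads of the runs of a list (the distinct characters in order, for a sorted list)
def runsHeads : List Char → List Char
  | [] => []
  | c :: rest => c :: runsHeads (rest.dropWhile (· == c))
termination_by s => s.length
decreasing_by
  simpa using Nat.lt_succ_of_le (List.length_dropWhile_le (· == c) rest)

theorem mem_runsHeads {s : List Char} {x : Char} (h : x ∈ runsHeads s) : x ∈ s := by
  induction s using runsHeads.induct with
  | case1 => simp [runsHeads] at h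
  | case2 c rest ih =>
    rw [runsHeads] at h
    rcases List.mem_cons.mp h with h | h
    · simp [h]
    · exact List.mem_cons_of_mem _ ((List.dropWhile_sublist _).subset (ih h))

theorem runsHeads_mem {s : List Char} (hs : s.Pairwise (· ≤ ·)) {x : Char} (h : x ∈ s) :
    x ∈ runsHeads s := by
  induction s using runsHeads.induct with
  | case1 => simp at h
  | case2 c rest ih =>
    rw [runsHeads]
    rcases List.mem_cons.mp h with h | h
    · simp [h]
    · rw [← List.takeWhile_append_dropWhile (p := (· == c)) (l := rest)] at h
      rcases List.mem_append.mp h with h | h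
      · have := List.mem_takeWhile_imp h
        simp_all
      · have hp : (rest.dropWhile (· == c)).Pairwise (· ≤ ·) :=
          List.Pairwise.sublist ((List.dropWhile_sublist _).cons _) hs
        exact List.mem_cons_of_mem _ (ih hp h)

theorem lt_of_mem_dropWhile {a : Char} {rest : List Char}
    (hp : (a :: rest).Pairwise (· ≤ ·)) {x : Char}
    (hx : x ∈ rest.dropWhile (· == a)) : a < x := by
  induction rest with
  | nil => simp at hx
  | cons r rs ih =>
    rw [List.pairwise_cons, List.pairwise_cons] at hp
    by_cases hr : r = a
    · subst hr
      rw [List.dropWhile_cons_of_pos (by simp)] at hx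
      exact ih (List.pairwise_cons.mpr ⟨fun y hy => hp.1 y (List.mem_cons_of_mem _ hy), hp.2.2⟩) hx
    · rw [List.dropWhile_cons_of_neg (by simpa using hr)] at hx
      have har : a < r := lt_of_le_of_ne (hp.1 r List.mem_cons_self) (Ne.symm hr)
      rcases List.mem_cons.mp hx with h | h
      · exact h ▸ har
      · exact lt_of_lt_of_le har (hp.2.1 x h)

theorem runsHeads_pairwise_lt {s : List Char} (hs : s.Pairwise (· ≤ ·)) :
    (runsHeads s).Pairwise (· < ·) := by
  induction s using runsHeads.induct with
  | case1 => simp [runsHeads]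
  | case2 c rest ih =>
    rw [runsHeads, List.pairwise_cons]
    have hp : (rest.dropWhile (· == c)).Pairwise (· ≤ ·) :=
      List.Pairwise.sublist ((List.dropWhile_sublist _).cons _) hs
    exact ⟨fun x hx => lt_of_mem_dropWhile hs (mem_runsHeads hx), ih hp⟩

theorem count_head_runs {c : Char} {rest : List Char}
    (hp : (c :: rest).Pairwise (· ≤ ·)) :
    (c :: rest).count c = (rest.takeWhile (· == c)).length + 1 := by
  have hsplit := List.takeWhile_append_dropWhile (p := (· == c)) (l := rest)
  have h1 : (rest.takeWhile (· == c)).count c = (rest.takeWhile (· == c)).length := by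
    apply List.count_eq_length.mpr
    intro y hy
    have := List.mem_takeWhile_imp hy
    simp_all [BEq.comm]
  have h2 : (rest.dropWhile (· == c)).count c = 0 := by
    apply List.count_eq_zero.mpr
    intro hmem
    exact absurd rfl (ne_of_gt (lt_of_mem_dropWhile hp hmem))
  calc (c :: rest).count c = rest.count c + 1 := by simp
    _ = ((rest.takeWhile (· == c)) ++ (rest.dropWhile (· == c))).count c + 1 := by rw [hsplit]
    _ = (rest.takeWhile (· == c)).length + 1 := by rw [List.count_append, h1, h2]

theorem count_tail_runs {c d : Char} {rest : List Char}
    (hp : (c :: rest).Pairwise (· ≤ ·)) (hd : d ∈ rest.dropWhile (· == c)) :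
    (c :: rest).count d = (rest.dropWhile (· == c)).count d := by
  have hcd : c < d := lt_of_mem_dropWhile hp hd
  have hsplit := List.takeWhile_append_dropWhile (p := (· == c)) (l := rest)
  have h1 : (rest.takeWhile (· == c)).count d = 0 := by
    apply List.count_eq_zero.mpr
    intro hmem
    have := List.mem_takeWhile_imp hmem
    simp only [beq_iff_eq] at this
    exact absurd (this ▸ hcd) (lt_irrefl _)
  calc (c :: rest).count d = rest.count d := by
        simp [(ne_of_gt hcd : d ≠ c).symm]
    _ = ((rest.takeWhile (· == c)) ++ (rest.dropWhile (· == c))).count d := by rw [hsplit]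
    _ = (rest.dropWhile (· == c)).count d := by rw [List.count_append, h1]; omega

theorem runsParts_eq_map {s : List Char} (hs : s.Pairwise (· ≤ ·)) :
    runsParts s = (runsHeads s).map (fun c =>
      if ((s.count c : Int)) == 1 then String.ofList [c]
      else String.ofList [c] ++ "^{" ++ PySem.Int.toStr ((s.count c : Int)) ++ "}") := by
  induction s using runsParts.induct with
  | case1 => simp [runsParts, runsHeads]
  | case2 c rest ih =>
    have hp : (rest.dropWhile (· == c)).Pairwise (· ≤ ·) :=
      List.Pairwise.sublist ((List.dropWhile_sublist _).cons _) hs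
    rw [runsParts, runsHeads, List.map_cons]
    congr 1
    · rw [count_head_runs hs]
      have hcond : (((((rest.takeWhile (· == c)).length + 1 : Nat)) : Int) == 1)
          = ((rest.takeWhile (· == c)).length + 1 == 1) := by
        simp
      by_cases hn : (rest.takeWhile (· == c)).length + 1 = 1
      · simp [hn]
      · simp only [hcond]
        rw [if_neg (by simpa using hn), if_neg (by simpa using hn)]
    · rw [ih hp]
      apply List.map_congr_left
      intro d hd
      rw [count_tail_runs hs (mem_runsHeads hd)]

-- ===== VERDICT (by name: the statement is the Claim_ definition above) =====

theorem term_to_latex_py_spec : Claim_equal_term_to_latex_py := by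
  intro name _
  unfold Spec_term_to_latex_py term_to_latex_py term_to_latex_py_alt
  split_ifs with h
  · rfl
  · set l := name.toList with hl
    congr 1
    have hc : (List.foldl (fun (d : PySem.Dict Char Int) ch => d.modify ch 0 (· + 1)) PySem.Dict.empty l)
        = PySem.Dict.counter l := (PySem.Dict.counter_eq_foldl l).symm
    simp only [hc]
    rw [PySem.Dict.keys_counter]
    -- turn the foldl-append loop into a map
    have hbody : (fun (parts : List String) (v : Char) =>
          if (PySem.Dict.counter l).getD v 0 == 1 then parts ++ [String.ofList [v]]
          else parts ++ [String.ofList [v] ++ "^{" ++ PySem.Int.toStr ((PySem.Dict.counter l).getD v 0) ++ "}"])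
        = (fun parts v => parts ++ [if (PySem.Dict.counter l).getD v 0 == 1 then String.ofList [v]
          else String.ofList [v] ++ "^{" ++ PySem.Int.toStr ((PySem.Dict.counter l).getD v 0) ++ "}"]) := by
      funext parts v
      split_ifs <;> rfl
    rw [hbody, PySem.List.foldl_append_singleton_eq_map, List.nil_append]
    simp only [PySem.Dict.getD_counter]
    -- name the sorted distinct characters as the run heads of the sorted list
    have hsort : (PySem.List.sorted l (fun x => x)).Pairwise (· ≤ ·) :=
      PySem.List.sorted_pairwise l (fun x => x)
    have hperm : (runsHeads (PySem.List.sorted l (fun x => x))).Perm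
        (PySem.Set.ofList l : List Char) := by
      apply (List.perm_ext_iff_of_nodup
        ((runsHeads_pairwise_lt hsort).imp ne_of_lt) (PySem.Set.nodup_ofList l)).mpr
      intro a
      constructor
      · intro ha
        exact (PySem.Set.mem_ofList l a).mpr
          ((PySem.List.mem_sorted l (fun x => x) false a).mp (mem_runsHeads ha))
      · intro ha
        exact runsHeads_mem hsort
          ((PySem.List.mem_sorted l (fun x => x) false a).mpr ((PySem.Set.mem_ofList l a).mp ha))
    have hkeys : PySem.List.sorted (PySem.Set.ofList l : List Char) (fun x => x)
        = runsHeads (PySem.List.sorted l (fun x => x)) :=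
      PySem.List.sorted_eq_of_perm_of_pairwise_lt _ _ _ hperm (runsHeads_pairwise_lt hsort)
    rw [hkeys, runsParts_eq_map hsort]
    apply List.map_congr_left
    intro d _
    rw [(PySem.List.sorted_perm l (fun x => x) false).count_eq d]
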